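-- pv_equiv track=rewrite | github.com/naosekine/leetcode-python | src/1979_FindGreatestCommonDivisorOfArray.py | findGCD
-- ===== SOURCE A (Python) =====
-- from typing import List
--
-- def findGCD(nums: List[int]) -> int:
--     minnum = min(nums)
--     maxnum = max(nums)
--     gcd = 1
--     for i in range(1,minnum + 1):
--         if minnum % i == 0 and maxnum % i == 0:
--             gcd = i
--     return gcd
-- ===== SOURCE B (Python) =====
-- from typing import List
--
-- def findGCD(nums: List[int]) -> int:
--     m = min(nums)
--     M = max(nums)
--     best = 1
--     i = 1
--     while i * i <= m:
--         if m % i == 0: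
--             if M % i == 0 and i > best:
--                 best = i
--             j = m // i
--             if M % j == 0 and j > best:
--                 best = j
--         i += 1
--     return best
-- ===== Notes on version B (the rewrite author's own statement) =====
-- stated objective: alternative
-- what changed: Replaced the full 1..min trial-division scan with an enumeration of divisor pairs (i, min//i) of min up to its square root, keeping the largest one that also divides max.
import Mathlib
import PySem

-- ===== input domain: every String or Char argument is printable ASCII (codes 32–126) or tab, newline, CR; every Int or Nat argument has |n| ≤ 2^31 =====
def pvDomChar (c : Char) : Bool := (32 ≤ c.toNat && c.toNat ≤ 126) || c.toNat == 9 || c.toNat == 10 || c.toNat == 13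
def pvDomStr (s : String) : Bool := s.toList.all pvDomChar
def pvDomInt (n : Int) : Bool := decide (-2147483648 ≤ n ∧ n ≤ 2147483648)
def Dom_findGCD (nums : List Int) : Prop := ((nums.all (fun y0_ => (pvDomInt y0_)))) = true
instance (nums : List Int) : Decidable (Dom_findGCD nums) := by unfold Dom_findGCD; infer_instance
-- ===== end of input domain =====

-- B replaces A's full 1..min trial-division scan by an enumeration of divisor pairs (i, min//i)
-- of min up to its square root, keeping the largest that also divides max (objective: alternative).

-- ===== PORT A =====
def findGCD (nums : List Int) : Int :=
  match PySem.List.min? nums (fun x => x), PySem.List.max? nums (fun x => x) with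
  | some minnum, some maxnum =>
      (PySem.List.pyRange 1 (minnum + 1) 1).foldl
        (fun gcd i => if PySem.Int.mod minnum i = 0 ∧ PySem.Int.mod maxnum i = 0 then i else gcd) 1
  | _, _ => 0   -- unreachable under Pre_ (Python raises ValueError on an empty list)

-- ===== PORT B =====
-- termination helper for B's while loop (cited in decreasing_by)
theorem pvIntLeSq (i : Int) : i ≤ i * i := by nlinarith [mul_self_nonneg (i - 1), mul_self_nonneg i]

-- B's `while i * i <= m` loop, step for step
def pvBLoop (m M i best : Int) : Int :=
  if h : i * i ≤ m then
    let best1 :=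
      if PySem.Int.mod m i = 0 then
        let b1 := if PySem.Int.mod M i = 0 ∧ best < i then i else best
        let j := PySem.Int.floordiv m i
        if PySem.Int.mod M j = 0 ∧ b1 < j then j else b1
      else best
    pvBLoop m M (i + 1) best1
  else best
termination_by (m + 1 - i).toNat
decreasing_by have := pvIntLeSq i; omega

def findGCD_alt (nums : List Int) : Int :=
  match PySem.List.min? nums (fun x => x) with
  | none => 0   -- unreachable under Pre_ (Python raises ValueError on an empty list)
  | some m =>
      match PySem.List.max? nums (fun x => x) with
      | none => 0
      | some M => pvBLoop m M 1 1

-- ===== PRECONDITION & SPEC =====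
-- Python's min/max raise ValueError on an empty list; Pre_ excludes exactly that input.
def Pre_findGCD (nums : List Int) : Prop := nums ≠ []
instance (nums : List Int) : Decidable (Pre_findGCD nums) := by unfold Pre_findGCD; infer_instance
def pvWitness_findGCD : List Int := [2, 4]

def Spec_findGCD (nums : List Int) (out : Int) : Prop := out = findGCD_alt nums
instance (nums : List Int) (out : Int) : Decidable (Spec_findGCD nums out) := by unfold Spec_findGCD; infer_instance

-- ===== CLAIM (what is proved, stated in full; the proofs are below) =====
def Claim_equal_findGCD : Prop := ∀ (nums : List Int), Dom_findGCD nums → Pre_findGCD nums → Spec_findGCD nums (findGCD nums)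

-- ===== LEMMAS AND PROOFS =====

-- gcd facts used on both sides (G below abbreviates ((Int.gcd m M : Nat) : Int))
theorem pvG1 (m M : Int) (hm : 1 ≤ m) : 1 ≤ ((Int.gcd m M : Nat) : Int) := by
  have hG0 : Int.gcd m M ≠ 0 := fun h => by
    have := Int.eq_zero_of_gcd_eq_zero_left h; omega
  exact_mod_cast Nat.one_le_iff_ne_zero.mpr hG0

theorem pvGmax (m M d : Int) (hm : 1 ≤ m) (_hd : 1 ≤ d) (h1 : d ∣ m) (h2 : d ∣ M) :
    d ≤ ((Int.gcd m M : Nat) : Int) :=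
  Int.le_of_dvd (by have := pvG1 m M hm; omega) (Int.dvd_coe_gcd h1 h2)

-- A's loop keeps the LAST range element satisfying the test; on a strictly increasing list
-- that is the largest satisfying element.
theorem pvFoldNone (Q : Int → Prop) [DecidablePred Q] (l : List Int) (g0 : Int)
    (h : ∀ i ∈ l, ¬ Q i) : l.foldl (fun g i => if Q i then i else g) g0 = g0 := by
  induction l generalizing g0 with
  | nil => rfl
  | cons a t ih =>
      simp only [List.foldl_cons]
      rw [if_neg (h a (List.mem_cons_self))]
      exact ih g0 (fun i hi => h i (List.mem_cons_of_mem a hi))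

theorem pvFoldLast (Q : Int → Prop) [DecidablePred Q] (G : Int) :
    ∀ (l : List Int) (g0 : Int), l.Pairwise (· < ·) → G ∈ l → Q G →
      (∀ i ∈ l, Q i → i ≤ G) →
      l.foldl (fun g i => if Q i then i else g) g0 = G := by
  intro l
  induction l with
  | nil => intro g0 _ hG; exact absurd hG (List.not_mem_nil)
  | cons a t ih =>
      intro g0 hp hG hQG hmax
      have hpa := (List.pairwise_cons.mp hp).1
      have hpt := (List.pairwise_cons.mp hp).2
      simp only [List.foldl_cons]
      rcases List.mem_cons.mp hG with heq | hGt
      · subst heq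
        rw [if_pos hQG]
        exact pvFoldNone Q t G (fun i hi hQi => by
          have h1 : G < i := hpa i hi
          have h2 : i ≤ G := hmax i (List.mem_cons_of_mem G hi) hQi
          omega)
      · exact ih _ hpt hGt hQG (fun i hi => hmax i (List.mem_cons_of_mem a hi))

-- A's loop computes gcd(m, M) when 1 ≤ m, and 1 otherwise
theorem pvAloop (m M : Int) :
    (PySem.List.pyRange 1 (m + 1) 1).foldl
      (fun gcd i => if PySem.Int.mod m i = 0 ∧ PySem.Int.mod M i = 0 then i else gcd) 1
    = if 1 ≤ m then ((Int.gcd m M : Nat) : Int) else 1 := by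
  by_cases hm : 1 ≤ m
  · rw [if_pos hm]
    have hG1 := pvG1 m M hm
    have hGm : ((Int.gcd m M : Nat) : Int) ≤ m := Int.le_of_dvd (by omega) (Int.gcd_dvd_left m M)
    apply pvFoldLast _ _
    · exact PySem.List.pairwise_lt_pyRange_one 1 (m + 1)
    · rw [PySem.List.mem_pyRange_one]; omega
    · exact ⟨(PySem.Int.mod_eq_zero_iff_dvd m _).mpr (Int.gcd_dvd_left m M),
            (PySem.Int.mod_eq_zero_iff_dvd M _).mpr (Int.gcd_dvd_right m M)⟩
    · intro i hi hQ
      have hi1 : 1 ≤ i := ((PySem.List.mem_pyRange_one).mp hi).1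
      exact pvGmax m M i hm hi1 ((PySem.Int.mod_eq_zero_iff_dvd m i).mp hQ.1)
        ((PySem.Int.mod_eq_zero_iff_dvd M i).mp hQ.2)
  · rw [if_neg hm, PySem.List.pyRange_one_eq_nil (by omega)]
    rfl

-- B's loop only ever increases best
theorem pvBLoop_ge_best (m M : Int) : ∀ (k : Nat) (i best : Int), (m + 1 - i).toNat ≤ k →
    best ≤ pvBLoop m M i best := by
  intro k
  induction k with
  | zero =>
      intro i best hk
      rw [pvBLoop]
      have := pvIntLeSq i
      rw [dif_neg (by omega)]
  | succ k ih =>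
      intro i best hk
      rw [pvBLoop]
      by_cases h : i * i ≤ m
      · rw [dif_pos h]
        have hi := pvIntLeSq i
        have hstep : best ≤ (if PySem.Int.mod m i = 0 then
            let b1 := if PySem.Int.mod M i = 0 ∧ best < i then i else best
            let j := PySem.Int.floordiv m i
            if PySem.Int.mod M j = 0 ∧ b1 < j then j else b1
          else best) := by
          split_ifs <;> simp_all <;> omega
        exact le_trans hstep (ih (i + 1) _ (by omega))
      · rw [dif_neg h]

-- every candidate B considers is a common divisor, hence ≤ gcd
theorem pvBLoop_le (m M : Int) (hm : 1 ≤ m) : ∀ (k : Nat) (i best : Int),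
    (m + 1 - i).toNat ≤ k → 1 ≤ i → best ≤ ((Int.gcd m M : Nat) : Int) →
    pvBLoop m M i best ≤ ((Int.gcd m M : Nat) : Int) := by
  intro k
  induction k with
  | zero =>
      intro i best hk _ hb
      rw [pvBLoop]
      have := pvIntLeSq i
      rw [dif_neg (by omega)]
      exact hb
  | succ k ih =>
      intro i best hk hi1 hb
      rw [pvBLoop]
      by_cases h : i * i ≤ m
      · rw [dif_pos h]
        have hile := pvIntLeSq i
        apply ih (i + 1) _ (by omega) (by omega)
        by_cases hdm : PySem.Int.mod m i = 0
        · rw [if_pos hdm]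
          have hidm : i ∣ m := (PySem.Int.mod_eq_zero_iff_dvd m i).mp hdm
          have hb1 : (if PySem.Int.mod M i = 0 ∧ best < i then i else best)
              ≤ ((Int.gcd m M : Nat) : Int) := by
            split_ifs with hc
            · exact pvGmax m M i hm hi1 hidm ((PySem.Int.mod_eq_zero_iff_dvd M i).mp hc.1)
            · exact hb
          set b1 := if PySem.Int.mod M i = 0 ∧ best < i then i else best with hb1def
          show (if PySem.Int.mod M (PySem.Int.floordiv m i) = 0 ∧ b1 < PySem.Int.floordiv m i
                then PySem.Int.floordiv m i else b1) ≤ ((Int.gcd m M : Nat) : Int)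
          split_ifs with hc
          · -- j = m / i is a divisor of m (since i ∣ m, 1 ≤ i) and of M
            have hfd : PySem.Int.floordiv m i = m / i :=
              PySem.Int.floordiv_eq_ediv_of_pos (by omega)
            have hjm : m / i ∣ m := ⟨i, (Int.ediv_mul_cancel hidm).symm⟩
            have hj1 : 1 ≤ m / i := by
              rw [Int.le_ediv_iff_mul_le (by omega : (0:ℤ) < i)]; omega
            have hjM : m / i ∣ M := by
              rw [hfd] at hc
              exact (PySem.Int.mod_eq_zero_iff_dvd M (m / i)).mp hc.1
            rw [hfd]
            exact pvGmax m M (m / i) hm hj1 hjm hjM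
          · exact hb1
        · rw [if_neg hdm]; exact hb
      · rw [dif_neg h]
        exact hb

-- once the loop reaches an index t at which its step pushes best to gcd, the result is ≥ gcd
theorem pvBLoop_reach (m M : Int) (t : Int)
    (ht1 : 1 ≤ t) (htt : t * t ≤ m)
    (hhit : ∀ best : Int, ((Int.gcd m M : Nat) : Int) ≤
      (if PySem.Int.mod m t = 0 then
        let b1 := if PySem.Int.mod M t = 0 ∧ best < t then t else best
        let j := PySem.Int.floordiv m t
        if PySem.Int.mod M j = 0 ∧ b1 < j then j else b1
      else best)) :
    ∀ (k : Nat) (i best : Int), (m + 1 - i).toNat ≤ k → 1 ≤ i → i ≤ t →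
    ((Int.gcd m M : Nat) : Int) ≤ pvBLoop m M i best := by
  intro k
  induction k with
  | zero =>
      intro i best hk hi1 hit
      exfalso
      have h1 := pvIntLeSq t
      omega
  | succ k ih =>
      intro i best hk hi1 hit
      have hii : i * i ≤ m := by
        have : i * i ≤ t * t := mul_le_mul hit hit (by omega) (by omega)
        omega
      rw [pvBLoop, dif_pos hii]
      rcases eq_or_lt_of_le hit with heq | hlt
      · subst heq
        exact le_trans (hhit best)
          (pvBLoop_ge_best m M ((m + 1 - (i + 1)).toNat) (i + 1) _ (le_refl _))
      · have := pvIntLeSq i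
        exact ih (i + 1) _ (by omega) (by omega) (by omega)

theorem pvBloop_eq (m M : Int) :
    pvBLoop m M 1 1 = if 1 ≤ m then ((Int.gcd m M : Nat) : Int) else 1 := by
  by_cases hm : 1 ≤ m
  · rw [if_pos hm]
    have hGdm : ((Int.gcd m M : Nat) : Int) ∣ m := Int.gcd_dvd_left m M
    have hGdM : ((Int.gcd m M : Nat) : Int) ∣ M := Int.gcd_dvd_right m M
    have hG1 := pvG1 m M hm
    have hGm : ((Int.gcd m M : Nat) : Int) ≤ m := Int.le_of_dvd (by omega) hGdm
    have hMG : PySem.Int.mod M ((Int.gcd m M : Nat) : Int) = 0 :=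
      (PySem.Int.mod_eq_zero_iff_dvd M _).mpr hGdM
    apply le_antisymm
    · exact pvBLoop_le m M hm (m + 1 - 1).toNat 1 1 (le_refl _) (le_refl _) hG1
    · -- the hitting index: gcd itself if gcd² ≤ m, otherwise its cofactor m / gcd
      by_cases hgg : ((Int.gcd m M : Nat) : Int) * ((Int.gcd m M : Nat) : Int) ≤ m
      · apply pvBLoop_reach m M _ hG1 hgg _ (m + 1 - 1).toNat 1 1 (le_refl _) (le_refl _) hG1
        intro best
        rw [if_pos ((PySem.Int.mod_eq_zero_iff_dvd m _).mpr hGdm)]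
        show ((Int.gcd m M : Nat) : Int) ≤
          (if PySem.Int.mod M (PySem.Int.floordiv m ((Int.gcd m M : Nat) : Int)) = 0 ∧
              (if PySem.Int.mod M ((Int.gcd m M : Nat) : Int) = 0 ∧
                  best < ((Int.gcd m M : Nat) : Int)
               then ((Int.gcd m M : Nat) : Int) else best)
              < PySem.Int.floordiv m ((Int.gcd m M : Nat) : Int)
           then PySem.Int.floordiv m ((Int.gcd m M : Nat) : Int)
           else (if PySem.Int.mod M ((Int.gcd m M : Nat) : Int) = 0 ∧
                    best < ((Int.gcd m M : Nat) : Int)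
                 then ((Int.gcd m M : Nat) : Int) else best))
        by_cases hb : best < ((Int.gcd m M : Nat) : Int)
        · have hbeq : (if PySem.Int.mod M ((Int.gcd m M : Nat) : Int) = 0 ∧
              best < ((Int.gcd m M : Nat) : Int)
              then ((Int.gcd m M : Nat) : Int) else best) = ((Int.gcd m M : Nat) : Int) :=
            if_pos ⟨hMG, hb⟩
          rw [hbeq]
          split_ifs with hc
          · omega
          · exact le_refl _
        · have hbeq : (if PySem.Int.mod M ((Int.gcd m M : Nat) : Int) = 0 ∧
              best < ((Int.gcd m M : Nat) : Int)
              then ((Int.gcd m M : Nat) : Int) else best) = best :=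
            if_neg (fun hcc => hb hcc.2)
          rw [hbeq]
          split_ifs with hc
          · omega
          · omega
      · -- cofactor c = m / gcd: 1 ≤ c, c < gcd, c·c ≤ m, and m // c = gcd
        have hGc : ((Int.gcd m M : Nat) : Int) * (m / ((Int.gcd m M : Nat) : Int)) = m :=
          Int.mul_ediv_cancel' hGdm
        set c : Int := m / ((Int.gcd m M : Nat) : Int) with hcdef
        have hc1 : 1 ≤ c := by
          by_contra hnc
          push Not at hnc
          nlinarith
        have hcG : c < ((Int.gcd m M : Nat) : Int) := by
          by_contra hnc
          push Not at hnc
          nlinarith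
        have hcc : c * c ≤ m := by nlinarith
        have hcdm : c ∣ m := ⟨((Int.gcd m M : Nat) : Int), by linarith [mul_comm c ((Int.gcd m M : Nat) : Int)]⟩
        have hmc : m / c = ((Int.gcd m M : Nat) : Int) := by
          have h2 : ((Int.gcd m M : Nat) : Int) * c / c = ((Int.gcd m M : Nat) : Int) :=
            Int.mul_ediv_cancel _ (by omega)
          rw [hGc] at h2
          exact h2
        apply pvBLoop_reach m M c hc1 hcc _ (m + 1 - 1).toNat 1 1 (le_refl _) (le_refl _) hc1
        intro best
        rw [if_pos ((PySem.Int.mod_eq_zero_iff_dvd m c).mpr hcdm)]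
        have hfd : PySem.Int.floordiv m c = ((Int.gcd m M : Nat) : Int) := by
          rw [PySem.Int.floordiv_eq_ediv_of_pos (by omega : (0:ℤ) < c)]
          exact hmc
        show ((Int.gcd m M : Nat) : Int) ≤
          (if PySem.Int.mod M (PySem.Int.floordiv m c) = 0 ∧
              (if PySem.Int.mod M c = 0 ∧ best < c then c else best) < PySem.Int.floordiv m c
           then PySem.Int.floordiv m c
           else (if PySem.Int.mod M c = 0 ∧ best < c then c else best))
        rw [hfd]
        by_cases hb : (if PySem.Int.mod M c = 0 ∧ best < c then c else best)
            < ((Int.gcd m M : Nat) : Int)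
        · rw [if_pos ⟨hMG, hb⟩]
        · rw [if_neg (fun hcc2 => hb hcc2.2)]
          omega
  · rw [if_neg hm, pvBLoop, dif_neg (by omega)]

-- both ports agree on every input (on the empty list both return the placeholder 0)
theorem pv_total_eq (nums : List Int) : findGCD nums = findGCD_alt nums := by
  unfold findGCD findGCD_alt
  cases PySem.List.min? nums (fun x => x) with
  | none => cases PySem.List.max? nums (fun x => x) <;> rfl
  | some m =>
      cases PySem.List.max? nums (fun x => x) with
      | none => rfl
      | some M =>
          show (PySem.List.pyRange 1 (m + 1) 1).foldl
              (fun gcd i => if PySem.Int.mod m i = 0 ∧ PySem.Int.mod M i = 0 then i else gcd) 1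
            = pvBLoop m M 1 1
          rw [pvAloop m M, pvBloop_eq m M]

-- ===== VERDICT (by name: the statement is the Claim_ definition above) =====
theorem findGCD_spec : Claim_equal_findGCD := by
  intro nums _ _
  exact pv_total_eq nums
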